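-- pv_equiv track=rewrite | github.com/eksyska/diplomka | models_strong.py | build_ket_orbits
-- ===== SOURCE A (Python) =====
-- def build_ket_orbits(basis_list):
--     """Find all translation orbits of single Fock states.
--
--     Args:
--         basis_list (list of tuples): Fock basis states
--
--     Returns:
--         ket_orbits  (list of lists): each entry is the orbit [s, T(s), T²(s), ...] ordered from the seed (= lexicographically smallest element).
--         ket_orbit_of (dict): state -> (orbit_index, position_within_orbit)
--     """
--
--     ket_orbits = []
--
--     visited = set()
--     for s in basis_list:
--
--         if s in visited:
--             continue
--
--         orb = []
--         cur = s
--         while True: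
--             orb.append(cur)
--             visited.add(cur)
--             cur = translate(cur)
--             if cur == s:
--                 break
--
--         ket_orbits.append(orb)
--
--     return ket_orbits
--
-- def translate(state):
--     """Translates a state
--
--     Args:
--         state (int tuple or list): input state
--
--     Returns:
--         tuple: translated state (int tuple)
--     """
--
--     state = tuple(state)
--     return tuple(state[-1:] + state[:-1])
-- ===== SOURCE B (Python) =====
-- def build_ket_orbits(basis_list):
--     """Translation orbits via closed-form rotations: no visited set, no translate helper.
--
--     For each unseen state, its fundamental period p is the smallest k in 1..n with
--     the k-fold right rotation equal to the state, and the orbit is produced directly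
--     by slicing; membership is checked against the orbits built so far.
--     """
--     orbits = []
--     for s in basis_list:
--         t = tuple(s)
--         if any(t in orb for orb in orbits):
--             continue
--         n = len(t)
--         p = next((k for k in range(1, n + 1) if t[n - k:] + t[:n - k] == t), 1)
--         orbits.append([t[n - k:] + t[:n - k] for k in range(p)])
--     return orbits
-- ===== Notes on version B (the rewrite author's own statement) =====
-- stated objective: alternative
-- what changed: Instead of A's while-loop that repeatedly applies translate and records every state in a global visited set, B computes each orbit in closed form (the fundamental period is the first k with the k-fold rotation slice equal to the state, and the orbit is a slicing comprehension over range(p)) and detects already-covered states by scanning the orbits built so far, with no translate helper and no visited set.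
import Mathlib
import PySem

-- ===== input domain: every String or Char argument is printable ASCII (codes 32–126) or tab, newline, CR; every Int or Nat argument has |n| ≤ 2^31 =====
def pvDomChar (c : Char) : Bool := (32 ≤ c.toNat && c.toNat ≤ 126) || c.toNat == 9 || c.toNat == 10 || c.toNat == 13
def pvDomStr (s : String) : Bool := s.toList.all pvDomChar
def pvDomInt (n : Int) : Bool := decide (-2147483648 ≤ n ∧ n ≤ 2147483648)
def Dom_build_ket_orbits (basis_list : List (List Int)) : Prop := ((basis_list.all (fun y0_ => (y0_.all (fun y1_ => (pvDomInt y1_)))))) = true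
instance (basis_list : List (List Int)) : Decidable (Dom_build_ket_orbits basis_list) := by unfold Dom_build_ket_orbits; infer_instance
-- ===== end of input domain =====

-- B replaces A's translate-while-loop and global visited set by closed-form orbit generation
-- (minimal-period search + slicing), detecting duplicates by scanning the orbits built so far (objective: alternative).


-- ===== PORT A =====
-- translate(state) = state[-1:] + state[:-1]
def pvTranslate (state : List Int) : List Int :=
  PySem.List.slice state (some (-1)) none ++ PySem.List.slice state none (some (-1))

-- the inner 'while True' loop of A; fuel s.length + 1 is enough because the loop exits after the
-- fundamental period ≤ max 1 (len s) steps (proved in pvOrbLoop_eq below), so the port is exact.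
def pvOrbLoop (s : List Int) : Nat → List Int → List (List Int) → PySem.Set (List Int) →
    List (List Int) × PySem.Set (List Int)
  | 0, _, orb, vis => (orb, vis)
  | fuel + 1, cur, orb, vis =>
    let orb' := orb ++ [cur]
    let vis' := PySem.Set.add vis cur
    let cur' := pvTranslate cur
    if cur' = s then (orb', vis') else pvOrbLoop s fuel cur' orb' vis'

def build_ket_orbits (basis_list : List (List Int)) : List (List (List Int)) :=
  (basis_list.foldl
    (fun acc s =>
      if PySem.Set.contains acc.2 s then acc
      else
        let r := pvOrbLoop s (s.length + 1) s [] acc.2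
        (acc.1 ++ [r.1], r.2))
    (([] : List (List (List Int))), (PySem.Set.empty : PySem.Set (List Int)))).1

-- ===== PORT B =====
-- t[n-k:] + t[:n-k]  (B's closed-form k-fold right rotation, written with Python slices)
def pvRotSlice (t : List Int) (k : Int) : List Int :=
  PySem.List.slice t (some ((t.length : Int) - k)) none ++
    PySem.List.slice t none (some ((t.length : Int) - k))

def build_ket_orbits_alt (basis_list : List (List Int)) : List (List (List Int)) :=
  basis_list.foldl
    (fun orbits s =>
      if orbits.any (fun orb => orb.contains s) then orbits
      else
        let p : Int :=
          ((PySem.List.pyRange 1 ((s.length : Int) + 1) 1).find?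
            (fun k => pvRotSlice s k == s)).getD 1
        orbits ++ [(PySem.List.pyRange 0 p 1).map (fun k => pvRotSlice s k)])
    []

-- ===== PRECONDITION & SPEC =====
def Spec_build_ket_orbits (basis_list : List (List Int)) (out : List (List (List Int))) : Prop := out = build_ket_orbits_alt basis_list
instance (basis_list : List (List Int)) (out : List (List (List Int))) : Decidable (Spec_build_ket_orbits basis_list out) := by unfold Spec_build_ket_orbits; infer_instance

-- ===== CLAIM (what is proved, stated in full; the proofs are below) =====
def Claim_equal_build_ket_orbits : Prop := ∀ (basis_list : List (List Int)), Dom_build_ket_orbits basis_list → Spec_build_ket_orbits basis_list (build_ket_orbits basis_list)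

-- ===== LEMMAS AND PROOFS =====

-- k-fold right rotation, the mathematical reference both ports are reduced to (meaningful for k ≤ len s)
def pvR (s : List Int) (k : Nat) : List Int := s.rotate (s.length - k)

theorem pvR_zero (s : List Int) : pvR s 0 = s := by simp [pvR, List.rotate_length]

theorem pvTranslate_eq (t : List Int) : pvTranslate t = t.rotate (t.length - 1) := by
  rw [pvTranslate, PySem.List.slice_from_neg_one, PySem.List.slice_to_neg_one,
    List.dropLast_eq_take, List.rotate_eq_drop_append_take (by omega)]

theorem pvRotSlice_eq (t : List Int) (k : Int) (h0 : 0 ≤ k) (h1 : k ≤ (t.length : Int)) :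
    pvRotSlice t k = pvR t k.toNat := by
  rw [pvRotSlice, PySem.List.slice_from t (by omega), PySem.List.slice_to t (by omega),
    pvR, List.rotate_eq_drop_append_take (by omega)]
  congr 1 <;> congr 1 <;> omega

theorem pvRotate_add_len (l : List Int) (a : Nat) : l.rotate (a + l.length) = l.rotate a := by
  rw [← List.rotate_rotate]
  conv_lhs => rw [show l.length = (l.rotate a).length by simp, List.rotate_length]

theorem pvTranslate_pvR (s : List Int) (j : Nat) (hj : j + 1 ≤ max 1 s.length) :
    pvTranslate (pvR s j) = pvR s (j + 1) := by
  rcases Nat.eq_zero_or_pos s.length with h | h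
  · have : s = [] := List.eq_nil_of_length_eq_zero h
    subst this; simp [pvTranslate, pvR, PySem.List.slice_from_neg_one, PySem.List.slice_to_neg_one]
  · have hjn : j + 1 ≤ s.length := by omega
    rw [pvTranslate_eq, pvR, List.length_rotate, List.rotate_rotate, pvR,
      show s.length - j + (s.length - 1) = (s.length - (j+1)) + s.length by omega,
      pvRotate_add_len]

theorem pvPeriod_ex (s : List Int) : ∃ k, 0 < k ∧ pvR s k = s := by
  rcases Nat.eq_zero_or_pos s.length with h | h
  · exact ⟨1, Nat.one_pos, by simp [pvR, List.eq_nil_of_length_eq_zero h]⟩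
  · exact ⟨s.length, h, by simp [pvR]⟩

-- the fundamental period of s under translation: the length of its orbit
def pvPeriod (s : List Int) : Nat := Nat.find (pvPeriod_ex s)

theorem pvPeriod_pos (s : List Int) : 0 < pvPeriod s := (Nat.find_spec (pvPeriod_ex s)).1
theorem pvPeriod_spec (s : List Int) : pvR s (pvPeriod s) = s := (Nat.find_spec (pvPeriod_ex s)).2
theorem pvPeriod_min (s : List Int) {j : Nat} (h0 : 0 < j) (hj : j < pvPeriod s) :
    pvR s j ≠ s := fun h => Nat.find_min (pvPeriod_ex s) hj ⟨h0, h⟩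

theorem pvPeriod_le (s : List Int) : pvPeriod s ≤ max 1 s.length := by
  rcases Nat.eq_zero_or_pos s.length with h | h
  · have : pvPeriod s ≤ 1 := Nat.find_le ⟨Nat.one_pos, by
      simp [pvR, List.eq_nil_of_length_eq_zero h]⟩
    omega
  · have : pvPeriod s ≤ s.length := Nat.find_le ⟨h, by simp [pvR]⟩
    omega

-- A's while loop, from step j on, emits exactly the rotations j, j+1, …, pvPeriod s - 1
theorem pvOrbLoop_eq (s : List Int) :
    ∀ (fuel j : Nat) (orb : List (List Int)) (vis : PySem.Set (List Int)),
      j < pvPeriod s → pvPeriod s ≤ j + fuel →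
      pvOrbLoop s fuel (pvR s j) orb vis =
        (orb ++ (List.range' j (pvPeriod s - j)).map (pvR s),
         ((List.range' j (pvPeriod s - j)).map (pvR s)).foldl PySem.Set.add vis) := by
  intro fuel
  induction fuel with
  | zero => intro j orb vis h1 h2; omega
  | succ fuel ih =>
    intro j orb vis h1 h2
    have hstep : pvTranslate (pvR s j) = pvR s (j + 1) :=
      pvTranslate_pvR s j (by have := pvPeriod_le s; omega)
    rw [pvOrbLoop]
    simp only [hstep]
    by_cases hend : j + 1 = pvPeriod s
    · rw [if_pos (by rw [hend]; exact pvPeriod_spec s)]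
      have h1' : pvPeriod s - j = 1 := by omega
      rw [h1', List.range'_one]
      simp
    · have hne : pvR s (j + 1) ≠ s := pvPeriod_min s (by omega) (by omega)
      rw [if_neg hne]
      rw [ih (j+1) (orb ++ [pvR s j]) (PySem.Set.add vis (pvR s j)) (by omega) (by omega)]
      have hr : List.range' j (pvPeriod s - j) = j :: List.range' (j+1) (pvPeriod s - (j+1)) := by
        rw [show pvPeriod s - j = (pvPeriod s - (j+1)) + 1 by omega, List.range'_succ]
      rw [hr]
      simp

theorem pvFind_first (q : Int → Bool) (b m : Int) (hq : q m = true) :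
    ∀ (n : Nat) (a : Int), m - a = n → a ≤ m → m < b → (∀ x, a ≤ x → x < m → q x = false) →
      (PySem.List.pyRange a b 1).find? q = some m := by
  intro n
  induction n with
  | zero =>
    intro a hn ham hmb _
    have : a = m := by omega
    subst this
    rw [PySem.List.pyRange_one_cons (by omega), List.find?_cons_of_pos hq]
  | succ n ih =>
    intro a hn ham hmb hmin
    rw [PySem.List.pyRange_one_cons (by omega),
      List.find?_cons_of_neg (by simp [hmin a le_rfl (by omega)])]
    exact ih (a + 1) (by omega) (by omega) hmb (fun x hx1 hx2 => hmin x (by omega) hx2)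

theorem pvPeriod_of_nil (s : List Int) (h : s.length = 0) : pvPeriod s = 1 := by
  have h1 := pvPeriod_le s
  have h2 := pvPeriod_pos s
  omega

-- B's period search returns exactly the fundamental period
theorem pvFind_eq (s : List Int) :
    (((PySem.List.pyRange 1 ((s.length : Int) + 1) 1).find?
        (fun k => pvRotSlice s k == s)).getD 1) = (pvPeriod s : Int) := by
  rcases Nat.eq_zero_or_pos s.length with h | h
  · rw [h, pvPeriod_of_nil s h]
    rw [show ((0 : Nat) : Int) + 1 = 1 by norm_num, PySem.List.pyRange_one_eq_nil le_rfl]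
    rfl
  · have hple : pvPeriod s ≤ s.length := by have := pvPeriod_le s; omega
    have hq : (fun k => pvRotSlice s k == s) ((pvPeriod s : Nat) : Int) = true := by
      show (pvRotSlice s ((pvPeriod s : Nat) : Int) == s) = true
      rw [pvRotSlice_eq s _ (Int.natCast_nonneg _) (by exact_mod_cast hple),
        Int.toNat_natCast, pvPeriod_spec s]
      exact beq_self_eq_true s
    rw [pvFind_first _ _ _ hq ((pvPeriod s - 1 : Nat)) 1 (by have := pvPeriod_pos s; omega)
      (by exact_mod_cast pvPeriod_pos s) (by exact_mod_cast Nat.lt_succ_of_le hple)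
      (fun x hx1 hx2 => ?_)]
    · rfl
    · have hxn : x ≤ (s.length : Int) := by omega
      rw [pvRotSlice_eq s x (by omega) hxn]
      have : pvR s x.toNat ≠ s := pvPeriod_min s (by omega) (by omega)
      simpa using this

-- B's orbit comprehension = the list of rotations 0 … pvPeriod s - 1
theorem pvOrbit_eq (s : List Int) :
    (PySem.List.pyRange 0 (pvPeriod s : Int) 1).map (fun k => pvRotSlice s k) =
      (List.range' 0 (pvPeriod s)).map (pvR s) := by
  rw [PySem.List.pyRange_zero, List.map_map, Int.toNat_natCast, ← List.range_eq_range']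
  apply List.map_congr_left
  intro k hk
  rw [List.mem_range] at hk
  have hle := pvPeriod_le s
  simp only [Function.comp_apply]
  rw [pvRotSlice_eq s (k : Int) (Int.natCast_nonneg _)
      (by exact_mod_cast (by omega : k ≤ s.length)), Int.toNat_natCast]

-- the two folds agree whenever A's visited set holds exactly the members of the orbits built so far
theorem pvOuter (l : List (List Int)) :
    ∀ (orbs : List (List (List Int))) (vis : PySem.Set (List Int)),
      (∀ x, x ∈ vis ↔ ∃ orb ∈ orbs, x ∈ orb) →
      (l.foldl
        (fun acc s =>
          if PySem.Set.contains acc.2 s then acc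
          else
            let r := pvOrbLoop s (s.length + 1) s [] acc.2
            (acc.1 ++ [r.1], r.2)) (orbs, vis)).1 =
      l.foldl
        (fun orbits s =>
          if orbits.any (fun orb => orb.contains s) then orbits
          else
            let p : Int :=
              ((PySem.List.pyRange 1 ((s.length : Int) + 1) 1).find?
                (fun k => pvRotSlice s k == s)).getD 1
            orbits ++ [(PySem.List.pyRange 0 p 1).map (fun k => pvRotSlice s k)]) orbs := by
  induction l with
  | nil => intro orbs vis _; rfl
  | cons s l ih =>
    intro orbs vis h2
    rw [List.foldl_cons, List.foldl_cons]
    have hcond : PySem.Set.contains vis s = orbs.any (fun orb => orb.contains s) := by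
      by_cases hm : s ∈ vis
      · rw [(PySem.Set.contains_iff vis s).mpr hm]
        obtain ⟨orb, ho, hso⟩ := (h2 s).mp hm
        exact (List.any_eq_true.mpr ⟨orb, ho, by simpa using hso⟩).symm
      · have hA : PySem.Set.contains vis s = false := by
          rw [Bool.eq_false_iff]
          exact fun h => hm ((PySem.Set.contains_iff vis s).mp h)
        have hB : orbs.any (fun orb => orb.contains s) = false := by
          rw [Bool.eq_false_iff]
          intro h
          obtain ⟨orb, ho, hso⟩ := List.any_eq_true.mp h
          exact hm ((h2 s).mpr ⟨orb, ho, by simpa using hso⟩)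
        rw [hA, hB]
    by_cases hs : s ∈ vis
    · rw [if_pos ((PySem.Set.contains_iff vis s).mpr hs),
        if_pos (hcond ▸ (PySem.Set.contains_iff vis s).mpr hs)]
      exact ih orbs vis h2
    · have hA : PySem.Set.contains vis s = false := by
        rw [Bool.eq_false_iff]
        exact fun h => hs ((PySem.Set.contains_iff vis s).mp h)
      rw [if_neg (by rw [hA]; exact Bool.false_ne_true),
        if_neg (by rw [← hcond, hA]; exact Bool.false_ne_true)]
      simp only
      have hloop : pvOrbLoop s (s.length + 1) s [] vis =
          ((List.range' 0 (pvPeriod s)).map (pvR s),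
           ((List.range' 0 (pvPeriod s)).map (pvR s)).foldl PySem.Set.add vis) := by
        have h := pvOrbLoop_eq s (s.length + 1) 0 [] vis (pvPeriod_pos s)
          (by have := pvPeriod_le s; omega)
        rw [pvR_zero] at h
        simpa using h
      rw [hloop, pvFind_eq s, pvOrbit_eq s]
      apply ih
      intro x
      have hmem : x ∈ ((List.range' 0 (pvPeriod s)).map (pvR s)).foldl PySem.Set.add vis ↔
          x ∈ vis ∨ x ∈ (List.range' 0 (pvPeriod s)).map (pvR s) := by
        have := PySem.Set.mem_foldl_add (l := (List.range' 0 (pvPeriod s)).map (pvR s))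
          (f := fun b => b) (s := vis) (y := x)
        simpa using this
      rw [hmem]
      constructor
      · rintro (hx | hx)
        · obtain ⟨orb, ho, hxo⟩ := (h2 x).mp hx
          exact ⟨orb, by simp [ho], hxo⟩
        · exact ⟨_, by simp, hx⟩
      · rintro ⟨orb, ho, hxo⟩
        rcases List.mem_append.mp ho with h | h
        · exact Or.inl ((h2 x).mpr ⟨orb, h, hxo⟩)
        · rw [List.mem_singleton.mp h] at hxo
          exact Or.inr hxo

-- ===== VERDICT (by name: the statement is the Claim_ definition above) =====
theorem build_ket_orbits_spec : Claim_equal_build_ket_orbits := by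
  intro basis_list _
  unfold Spec_build_ket_orbits build_ket_orbits build_ket_orbits_alt
  exact pvOuter basis_list [] PySem.Set.empty (by simp [PySem.Set.empty])
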